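-- pv_equiv track=rewrite | github.com/XinyiYing/RFR | codes/utils.py | extend_img_list
-- ===== SOURCE A (Python) =====
-- def extend_img_list(img_list, seq_len, mode='replicate'):
--     out_img_list = img_list
--
--     if mode=='replicate':
--         for i in range(len(img_list)):
--             if img_list[i] == 'Not same sequence':
--                 out_img_list[i] = img_list[i-1]
--
--     if mode=='extend':
--         if len(img_list)>1:
--             extend_times = (seq_len - len(img_list))//(len(img_list)-1) + 1
--             for _ in range(extend_times):
--                 out_img_list = out_img_list + img_list[::-1][1:]
--                 img_list = img_list[::-1]
--         else:
--             for _ in range(seq_len-1):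
--                 out_img_list = out_img_list + img_list
--
--     return out_img_list[:seq_len]
-- ===== SOURCE B (Python) =====
-- def extend_img_list(img_list, seq_len, mode='replicate'):
--     n = len(img_list)
--     if mode == 'replicate':
--         out = []
--         prev = img_list[-1] if img_list else None
--         for x in img_list:
--             y = prev if x == 'Not same sequence' else x
--             out.append(y)
--             prev = y
--         return out[:seq_len]
--     if mode == 'extend' and n > 0:
--         period = 2 * n - 2 if n > 1 else 1
--         out = []
--         for j in range(max(seq_len, 0)):
--             r = j % period
--             out.append(img_list[r if r < n else period - r])
--         return out
--     return img_list[:seq_len]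
-- ===== Notes on version B (the rewrite author's own statement) =====
-- stated objective: alternative
-- what changed: B replaces A's repeated reverse-and-concatenate extension loop by directly generating each output element from a closed-form ping-pong index (j mod 2n-2, mirrored), and replaces A's in-place index loop for 'replicate' by a single forward pass carrying the previous output element.
-- outside the precondition, e.g. on extend_img_list(['a', 'b', 'c'], -1, 'extend'): A returns ['a', 'b'], B returns []
import Mathlib
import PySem

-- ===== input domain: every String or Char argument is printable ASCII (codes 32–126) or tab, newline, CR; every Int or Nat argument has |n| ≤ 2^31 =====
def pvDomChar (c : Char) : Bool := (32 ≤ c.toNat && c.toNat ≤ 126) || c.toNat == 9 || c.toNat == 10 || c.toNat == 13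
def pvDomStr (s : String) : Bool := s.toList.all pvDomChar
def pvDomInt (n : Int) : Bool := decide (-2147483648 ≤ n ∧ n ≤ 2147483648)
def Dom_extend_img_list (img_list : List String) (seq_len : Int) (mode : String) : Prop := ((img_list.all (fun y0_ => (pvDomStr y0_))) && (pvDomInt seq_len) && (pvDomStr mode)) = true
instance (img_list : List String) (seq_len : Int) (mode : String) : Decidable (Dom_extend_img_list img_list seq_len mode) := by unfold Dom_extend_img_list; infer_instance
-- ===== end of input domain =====

-- B replaces A's repeated list-reversal/concatenation extension loop by a direct
-- closed-form ping-pong index formula, and A's in-place 'replicate' index loop by a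
-- single forward pass carrying the previous output element (alternative algorithm,
-- similar measured cost). Note: A mutates img_list in place in 'replicate' mode
-- (aliasing); B does not — the equivalence proved here is about the RETURN value only.

-- ===== PORT A =====
-- In Python `out_img_list = img_list` aliases, so the replicate loop reads and
-- writes ONE list: it is modelled as the fold state. Loop indices are always in
-- range (i-1 wraps to -1 at i=0, Python negative indexing), so pyGetD/pySetD are exact.
-- xs[::-1] = xs.reverse (PySem.List.slice?_none_none_neg_one), xs[1:] = xs.drop 1.
def extend_img_list (img_list : List String) (seq_len : Int) (mode : String) : List String :=
  let out1 : List String :=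
    if mode = "replicate" then
      (PySem.List.pyRange 0 (img_list.length : Int) 1).foldl
        (fun cur i =>
          if PySem.List.pyGetD cur i "" = "Not same sequence" then
            PySem.List.pySetD cur i (PySem.List.pyGetD cur (i - 1) "")
          else cur)
        img_list
    else img_list
  let out2 : List String :=
    if mode = "extend" then
      if 1 < img_list.length then
        let extend_times : Int :=
          PySem.Int.floordiv (seq_len - (img_list.length : Int)) ((img_list.length : Int) - 1) + 1
        ((PySem.List.pyRange 0 extend_times 1).foldl
          (fun (st : List String × List String) _ =>
            (st.1 ++ st.2.reverse.drop 1, st.2.reverse))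
          (out1, img_list)).1
      else
        (PySem.List.pyRange 0 (seq_len - 1) 1).foldl (fun o _ => o ++ img_list) out1
    else out1
  PySem.List.slice out2 none (some seq_len)

-- ===== PORT B =====
-- prev = img_list[-1] if img_list else None: the "" default is never used when img_list = [].
-- In the extend branch every index is in range, so pyGetD is exact.
def extend_img_list_alt (img_list : List String) (seq_len : Int) (mode : String) : List String :=
  let n := img_list.length
  if mode = "replicate" then
    let st := img_list.foldl
      (fun (st : List String × String) x =>
        let y := if x = "Not same sequence" then st.2 else x
        (st.1 ++ [y], y))
      ([], PySem.List.pyGetD img_list (-1) "")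
    PySem.List.slice st.1 none (some seq_len)
  else if mode = "extend" ∧ 0 < n then
    let period : Int := if 1 < n then 2 * (n : Int) - 2 else 1
    (PySem.List.pyRange 0 (max seq_len 0) 1).map
      (fun j =>
        let r := PySem.Int.mod j period
        PySem.List.pyGetD img_list (if r < (n : Int) then r else period - r) "")
  else
    PySem.List.slice img_list none (some seq_len)

-- ===== PRECONDITION & SPEC =====
-- Pre_ excludes only mode 'extend' with a NEGATIVE seq_len: a sequence length is a
-- count, and there A's value is an artefact of Python negative slicing of the
-- partially extended list, which B's direct generation has no reason to reproduce.
def Pre_extend_img_list (img_list : List String) (seq_len : Int) (mode : String) : Prop :=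
  mode = "extend" → 0 ≤ seq_len
instance (img_list : List String) (seq_len : Int) (mode : String) : Decidable (Pre_extend_img_list img_list seq_len mode) := by unfold Pre_extend_img_list; infer_instance
def pvWitness_extend_img_list : List String × Int × String := (["a", "b", "c"], 7, "extend")

def Spec_extend_img_list (img_list : List String) (seq_len : Int) (mode : String) (out : List String) : Prop := out = extend_img_list_alt img_list seq_len mode
instance (img_list : List String) (seq_len : Int) (mode : String) (out : List String) : Decidable (Spec_extend_img_list img_list seq_len mode out) := by unfold Spec_extend_img_list; infer_instance

-- ===== CLAIM (what is proved, stated in full; the proofs are below) =====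
def Claim_equal_extend_img_list : Prop := ∀ (img_list : List String) (seq_len : Int) (mode : String), Dom_extend_img_list img_list seq_len mode → Pre_extend_img_list img_list seq_len mode → Spec_extend_img_list img_list seq_len mode (extend_img_list img_list seq_len mode)

-- ===== LEMMAS AND PROOFS =====

-- ping-pong index and prefix list (proof-only helpers)
def ppIdx (n j : Nat) : Nat := if j % (2*n-2) < n then j % (2*n-2) else 2*n-2 - j % (2*n-2)
def ppList (l : List String) (m : Nat) : List String :=
  (List.range m).map (fun j => l.getD (ppIdx l.length j) "")
def gstep (st : List String × List String) : List String × List String :=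
  (st.1 ++ st.2.reverse.drop 1, st.2.reverse)
def dir (l : List String) (t : Nat) : List String := if t % 2 = 0 then l else l.reverse

-- A's loop body in replicate mode (definitionally the lambda in the port)
def fA (cur : List String) (i : Int) : List String :=
  if PySem.List.pyGetD cur i "" = "Not same sequence" then
    PySem.List.pySetD cur i (PySem.List.pyGetD cur (i - 1) "")
  else cur
-- B's loop body in replicate mode (definitionally the lambda in the port)
def fB (st : List String × String) (x : String) : List String × String :=
  (st.1 ++ [if x = "Not same sequence" then st.2 else x],
   if x = "Not same sequence" then st.2 else x)

theorem foldl_gstep (r : List Int) : ∀ (st : List String × List String),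
    r.foldl (fun st _ => gstep st) st = gstep^[r.length] st := by
  induction r with
  | nil => intro st; rfl
  | cons a r ih => intro st; simp [List.foldl_cons, ih, Function.iterate_succ_apply]

theorem dir_reverse (l : List String) (t : Nat) : (dir l t).reverse = dir l (t+1) := by
  unfold dir
  rcases Nat.even_or_odd t with ⟨q, hq⟩ | ⟨q, hq⟩
  · have h1 : t % 2 = 0 := by omega
    have h2 : (t+1) % 2 = 1 := by omega
    simp [h1, h2]
  · have h1 : t % 2 = 1 := by omega
    have h2 : (t+1) % 2 = 0 := by omega
    simp [h1, h2]

theorem length_dir (l : List String) (t : Nat) : (dir l t).length = l.length := by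
  unfold dir; split <;> simp

theorem ppIdx_even (m t q s : Nat) (ht : t = 2*q) (hs : s ≤ m) :
    ppIdx (m+2) ((m+2) + t*(m+1) + s) = m - s := by
  have harg : (m+2) + t*(m+1) + s = (2*m+2)*q + (m+2+s) := by subst ht; ring
  have hP : 2*(m+2)-2 = 2*m+2 := by omega
  unfold ppIdx
  rw [hP, harg, Nat.mul_add_mod]
  rcases Nat.lt_or_ge s m with h | h
  · have hmod : (m+2+s) % (2*m+2) = m+2+s := Nat.mod_eq_of_lt (by omega)
    rw [hmod, if_neg (by omega)]
    omega
  · have hmod : (m+2+s) % (2*m+2) = 0 := by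
      have h2 : m+2+s = 2*m+2 := by omega
      rw [h2, Nat.mod_self]
    rw [hmod, if_pos (by omega)]
    omega

theorem ppIdx_odd (m t q s : Nat) (ht : t = 2*q+1) (hs : s ≤ m) :
    ppIdx (m+2) ((m+2) + t*(m+1) + s) = s + 1 := by
  have harg : (m+2) + t*(m+1) + s = (2*m+2)*(q+1) + (s+1) := by subst ht; ring
  have hP : 2*(m+2)-2 = 2*m+2 := by omega
  unfold ppIdx
  rw [hP, harg, Nat.mul_add_mod]
  have hmod : (s+1) % (2*m+2) = s+1 := Nat.mod_eq_of_lt (by omega)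
  rw [hmod, if_pos (by omega)]

theorem getD_eq_getElem' (l : List String) (i : Nat) (hi : i < l.length) :
    l.getD i "" = l[i]'hi := by
  rw [List.getD_eq_getElem?_getD, List.getElem?_eq_getElem hi]; rfl

theorem ppList_block (l : List String) (h : 2 ≤ l.length) (t : Nat) :
    ppList l (l.length + (t+1)*(l.length-1))
      = ppList l (l.length + t*(l.length-1)) ++ (dir l (t+1)).drop 1 := by
  obtain ⟨m, hm⟩ : ∃ m, l.length = m + 2 := ⟨l.length - 2, by omega⟩
  have hsplit : l.length + (t+1)*(l.length-1) = (l.length + t*(l.length-1)) + (l.length-1) := by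
    rw [Nat.succ_mul]; omega
  rw [hsplit]
  unfold ppList
  rw [List.range_add, List.map_append, List.map_map]
  congr 1
  apply List.ext_getElem
  · simp [length_dir, hm]
  · intro s h1 h2
    have hs : s ≤ m := by simp [hm] at h1; omega
    simp only [List.getElem_map, List.getElem_range, Function.comp_apply]
    rcases Nat.even_or_odd t with ⟨q, hq⟩ | ⟨q, hq⟩
    · have hidx : ppIdx l.length (l.length + t*(l.length-1) + s) = m - s := by
        rw [hm]
        have h1' : m + 2 - 1 = m + 1 := by omega
        rw [h1']
        exact ppIdx_even m t q s (by omega) hs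
      rw [hidx]
      have ht1 : (t+1) % 2 = 1 := by omega
      have hdir : dir l (t+1) = l.reverse := by unfold dir; rw [if_neg (by omega)]
      rw [getD_eq_getElem' l (m-s) (by omega)]
      simp only [hdir]
      rw [List.getElem_drop, List.getElem_reverse]
      congr 1
      omega
    · have hidx : ppIdx l.length (l.length + t*(l.length-1) + s) = s + 1 := by
        rw [hm]
        have h1' : m + 2 - 1 = m + 1 := by omega
        rw [h1']
        exact ppIdx_odd m t q s (by omega) hs
      rw [hidx]
      have ht1 : (t+1) % 2 = 0 := by omega
      have hdir : dir l (t+1) = l := by unfold dir; rw [if_pos ht1]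
      rw [getD_eq_getElem' l (s+1) (by omega)]
      simp only [hdir]
      rw [List.getElem_drop]
      congr 1
      omega

theorem ppList_self (l : List String) (h : 2 ≤ l.length) : ppList l l.length = l := by
  apply List.ext_getElem
  · simp [ppList]
  · intro i h1 h2
    simp only [ppList, List.getElem_map, List.getElem_range]
    have hi : i < l.length := h2
    have hidx : ppIdx l.length i = i := by
      unfold ppIdx
      have hmod : i % (2*l.length-2) = i := Nat.mod_eq_of_lt (by omega)
      rw [hmod, if_pos hi]
    rw [hidx, getD_eq_getElem' l i hi]

theorem iterate_gstep (l : List String) (h : 2 ≤ l.length) : ∀ t : Nat,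
    gstep^[t] (l, l) = (ppList l (l.length + t * (l.length - 1)), dir l t) := by
  intro t
  induction t with
  | zero => simp [dir, ppList_self l h]
  | succ t ih =>
    rw [Function.iterate_succ_apply', ih]
    show (_ ++ (dir l t).reverse.drop 1, (dir l t).reverse) = _
    rw [dir_reverse, ppList_block l h t]

theorem set_append_right' (l1 l2 : List String) (y : String) (i : Nat) :
    (l1 ++ l2).set (l1.length + i) y = l1 ++ l2.set i y := by
  induction l1 with
  | nil => simp
  | cons a l1 ih => simp [ih, Nat.add_right_comm]

theorem getD_append_length (l1 l2 : List String) (x : String) (d : String) :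
    (l1 ++ x :: l2).getD l1.length d = x := by
  rw [List.getD_eq_getElem?_getD, List.getElem?_append_right (le_refl _)]
  simp

theorem getD_append_last (l1 l2 : List String) (prev d : String)
    (h : l1.getLast? = some prev) :
    (l1 ++ l2).getD (l1.length - 1) d = prev := by
  have hne : l1 ≠ [] := by rintro rfl; simp at h
  have hlen : 0 < l1.length := List.length_pos_iff.mpr hne
  rw [List.getD_eq_getElem?_getD, List.getElem?_append_left (by omega)]
  rw [List.getLast?_eq_getElem?] at h
  simp [h]

theorem repl_loop (suf : List String) : ∀ (pre : List String) (prev : String),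
    pre ≠ [] → pre.getLast? = some prev →
    ((List.range suf.length).map (fun k => ((pre.length + k : Nat) : Int))).foldl fA (pre ++ suf)
      = (suf.foldl fB (pre, prev)).1 := by
  induction suf with
  | nil => intro pre prev _ _; simp
  | cons x xs ih =>
    intro pre prev hne hlast
    rw [List.length_cons, List.range_succ_eq_map, List.map_cons, List.foldl_cons]
    have hstep : fA (pre ++ x :: xs) ((pre.length + 0 : Nat) : Int)
        = (pre ++ [if x = "Not same sequence" then prev else x]) ++ xs := by
      unfold fA
      rw [PySem.List.pyGetD_natCast]
      simp only [Nat.add_zero]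
      rw [getD_append_length]
      by_cases hx : x = "Not same sequence"
      · rw [if_pos hx, if_pos hx]
        have hsub : ((pre.length : Nat) : Int) - 1 = ((pre.length - 1 : Nat) : Int) := by
          have : 0 < pre.length := List.length_pos_iff.mpr hne
          omega
        rw [hsub, PySem.List.pyGetD_natCast, PySem.List.pySetD_natCast]
        rw [getD_append_last pre (x :: xs) prev "" hlast]
        have h0 : pre.length = pre.length + 0 := rfl
        rw [h0, set_append_right']
        simp
      · rw [if_neg hx, if_neg hx]
        simp
    rw [hstep]
    have hmap : (List.map (fun k => ((pre.length + k : Nat) : Int)) ((List.range xs.length).map (·+1)))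
        = (List.range xs.length).map (fun k => (((pre ++ [if x = "Not same sequence" then prev else x]).length + k : Nat) : Int)) := by
      rw [List.map_map]
      apply List.map_congr_left
      intro k _
      simp
      omega
    rw [hmap]
    rw [ih (pre ++ [if x = "Not same sequence" then prev else x]) (if x = "Not same sequence" then prev else x) (by simp) List.getLast?_concat]
    rfl

-- replicate branch: A's in-place loop equals B's single forward pass
theorem replicate_eq (l : List String) :
    (PySem.List.pyRange 0 (l.length : Int) 1).foldl fA l
      = (l.foldl fB ([], PySem.List.pyGetD l (-1) "")).1 := by
  cases l with
  | nil => simp [PySem.List.pyRange_one_eq_nil]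
  | cons x xs =>
    rw [PySem.List.pyRange_one_cons (by exact_mod_cast Nat.succ_pos xs.length), List.foldl_cons]
    have hstep : fA (x :: xs) 0
        = [if x = "Not same sequence" then PySem.List.pyGetD (x :: xs) (-1) "" else x] ++ xs := by
      unfold fA
      rw [PySem.List.pyGetD_zero_cons]
      by_cases hx : x = "Not same sequence"
      · rw [if_pos hx, if_pos hx]
        have h01 : (0:Int) - 1 = -1 := by norm_num
        rw [h01, PySem.List.pySetD_of_nonneg (x :: xs) _ (by norm_num)]
        simp
      · rw [if_neg hx, if_neg hx]
        simp
    rw [hstep]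
    have hrange : PySem.List.pyRange (0+1) ((x :: xs).length : Int) 1
        = (List.range xs.length).map (fun k =>
            ((([if x = "Not same sequence" then PySem.List.pyGetD (x :: xs) (-1) "" else x]).length + k : Nat) : Int)) := by
      rw [PySem.List.pyRange_one]
      have hlen : (((x :: xs).length : Int) - (0+1)).toNat = xs.length := by simp
      rw [hlen]
      apply List.map_congr_left
      intro k _
      simp
    rw [hrange]
    rw [repl_loop xs [if x = "Not same sequence" then PySem.List.pyGetD (x :: xs) (-1) "" else x] (if x = "Not same sequence" then PySem.List.pyGetD (x :: xs) (-1) "" else x) (by simp) (by simp)]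
    rfl

theorem flatten_replicate_nil (k : Nat) : (List.replicate k ([] : List String)).flatten = [] := by
  induction k with
  | zero => rfl
  | succ k ih => simp [List.replicate_succ, ih]

theorem flatten_replicate_singleton (x : String) (k : Nat) :
    (List.replicate k [x]).flatten = List.replicate k x := by
  induction k with
  | zero => rfl
  | succ k ih => simp [List.replicate_succ, ih]

theorem foldl_append_const (l0 : List String) (r : List Int) : ∀ acc : List String,
    r.foldl (fun o _ => o ++ l0) acc = acc ++ (List.replicate r.length l0).flatten := by
  induction r with
  | nil => intro acc; simp
  | cons a r ih => intro acc; simp [List.foldl_cons, ih, List.replicate_succ]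

-- arithmetic: A appends enough blocks to cover seq_len
theorem extend_times_bound (n : Nat) (h : 2 ≤ n) (S : Int) (hS : 0 ≤ S) :
    S.toNat ≤ n + (PySem.Int.floordiv (S - n) ((n:Int)-1) + 1).toNat * (n - 1) := by
  set fd := PySem.Int.floordiv (S - n) ((n:Int)-1) with hfd
  rcases le_or_gt (fd + 1) 0 with hle | hpos
  · have hfd0 : fd < 0 := by omega
    have hSn : S < n := by
      by_contra hc
      have hge : (n:Int) ≤ S := by omega
      have : 0 ≤ fd := by
        rw [hfd, PySem.Int.floordiv_eq_ediv_of_pos (by omega)]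
        exact Int.ediv_nonneg (by omega) (by omega)
      omega
    have : (fd + 1).toNat = 0 := by omega
    omega
  · have hmod := PySem.Int.floordiv_mul_add_mod (S - n) ((n:Int)-1)
    rw [← hfd] at hmod
    have hm0 : 0 ≤ PySem.Int.mod (S - n) ((n:Int)-1) := PySem.Int.mod_nonneg _ (by omega)
    have hm1 : PySem.Int.mod (S - n) ((n:Int)-1) < (n:Int)-1 := PySem.Int.mod_lt _ (by omega)
    set md := PySem.Int.mod (S - n) ((n:Int)-1) with hmd
    set T := (fd + 1).toNat with hT
    have hTc : (T : Int) = fd + 1 := by omega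
    have hexp : ((n + T * (n-1) : Nat) : Int) = (n : Int) + (T : Int) * ((n:Int)-1) := by
      push_cast [Nat.cast_sub (by omega : 1 ≤ n)]
      ring
    have hring : ((fd:Int)+1) * ((n:Int)-1) = fd * ((n:Int)-1) + ((n:Int)-1) := by ring
    have hfin : S ≤ ((n + T * (n-1) : Nat) : Int) := by
      rw [hexp, hTc, hring]
      omega
    omega

-- B's extend branch (n ≥ 2) computes the ping-pong prefix
theorem alt_extend_big (l : List String) (h : 2 ≤ l.length) (S : Int) (hS : 0 ≤ S) :
    (PySem.List.pyRange 0 (max S 0) 1).map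
      (fun j =>
        PySem.List.pyGetD l
          (if PySem.Int.mod j (2*(l.length:Int)-2) < (l.length:Int)
           then PySem.Int.mod j (2*(l.length:Int)-2)
           else (2*(l.length:Int)-2) - PySem.Int.mod j (2*(l.length:Int)-2)) "")
      = ppList l S.toNat := by
  have hmax : max S 0 = S := by omega
  rw [hmax, PySem.List.pyRange_one, List.map_map]
  have hlen : (S - 0).toNat = S.toNat := by omega
  rw [hlen]
  unfold ppList
  apply List.map_congr_left
  intro k _
  simp only [Function.comp_apply]
  have hcast : 2*((l.length:Nat):Int)-2 = ((2*l.length-2 : Nat) : Int) := by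
    have : 2 ≤ l.length := h
    omega
  have harg : (0 : Int) + (k : Int) = ((k : Nat) : Int) := by omega
  rw [harg, hcast, PySem.Int.mod_natCast]
  have hmlt : k % (2*l.length-2) < 2*l.length-2 := Nat.mod_lt _ (by omega)
  unfold ppIdx
  by_cases hc : k % (2*l.length-2) < l.length
  · rw [if_pos (by exact_mod_cast hc), if_pos hc, PySem.List.pyGetD_natCast]
  · rw [if_neg (by exact_mod_cast hc)]
    have hsub : ((2*l.length-2 : Nat) : Int) - ((k % (2*l.length-2) : Nat) : Int)
        = ((2*l.length-2 - k % (2*l.length-2) : Nat) : Int) := by omega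
    rw [hsub, PySem.List.pyGetD_natCast, if_neg hc]

-- take of a ping-pong prefix
theorem take_ppList (l : List String) (s m : Nat) (hsm : s ≤ m) :
    (ppList l m).take s = ppList l s := by
  unfold ppList
  rw [← List.map_take, List.take_range]
  have hmin : min s m = s := by omega
  rw [hmin]

theorem map_const_replicate (x : String) (r : List Int) :
    r.map (fun _ => x) = List.replicate r.length x := by
  induction r with
  | nil => rfl
  | cons a r ih => simp [ih, List.replicate_succ]

-- ===== VERDICT (by name: the statement is the Claim_ definition above) =====
theorem extend_img_list_spec : Claim_equal_extend_img_list := by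
  intro l S mode _hdom hpre
  unfold Spec_extend_img_list
  by_cases hrep : mode = "replicate"
  · -- replicate branch
    subst hrep
    simp only [extend_img_list, extend_img_list_alt, reduceIte]
    exact congrArg (fun ll => PySem.List.slice ll none (some S)) (replicate_eq l)
  · by_cases hext : mode = "extend"
    · -- extend branch
      subst hext
      have hS : 0 ≤ S := hpre rfl
      have hne : ¬("extend" = "replicate") := by decide
      simp only [extend_img_list, extend_img_list_alt]
      rw [if_neg hne, if_neg hne]
      match l with
      | [] =>
        rw [if_neg (by simp : ¬(1 < ([] : List String).length)), if_pos (trivial : True),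
            if_neg (by simp : ¬(True ∧ 0 < ([] : List String).length))]
        rw [foldl_append_const]
        rw [flatten_replicate_nil]
        simp
      | [x] =>
        have hn1 : ¬(1 < [x].length) := by simp
        have hn0 : 0 < [x].length := by simp
        rw [if_neg hn1, if_pos (trivial : True), if_pos (⟨trivial, hn0⟩ : True ∧ 0 < [x].length),
            if_neg hn1]
        have hbody : (fun (j : Int) =>
            PySem.List.pyGetD [x]
              (if PySem.Int.mod j 1 < (([x].length : Nat) : Int) then PySem.Int.mod j 1
               else 1 - PySem.Int.mod j 1) "") = (fun _ => x) := by
          funext j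
          have hm : PySem.Int.mod j 1 = 0 := by
            rw [PySem.Int.mod_eq_emod_of_pos (by norm_num)]
            exact Int.emod_one j
          rw [hm]
          simp [PySem.List.pyGetD_zero_cons]
        rw [hbody, map_const_replicate]
        rw [foldl_append_const, flatten_replicate_singleton, List.singleton_append,
            ← List.replicate_succ]
        rw [PySem.List.slice_to _ hS, List.take_replicate]
        rw [PySem.List.length_pyRange_one, PySem.List.length_pyRange_one]
        congr 1
        omega
      | x :: y :: ys =>
        have h2 : 2 ≤ (x :: y :: ys).length := by simp
        have h1lt : 1 < (x :: y :: ys).length := by simp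
        rw [if_pos h1lt, if_pos (trivial : True),
            if_pos (⟨trivial, by simp⟩ : True ∧ 0 < (x :: y :: ys).length), if_pos h1lt]
        have hG : (fun (st : List String × List String) (_ : Int) =>
            (st.1 ++ List.drop 1 st.2.reverse, st.2.reverse)) = (fun st (_ : Int) => gstep st) := rfl
        rw [hG, foldl_gstep, PySem.List.length_pyRange_one, sub_zero,
            iterate_gstep _ h2]
        show PySem.List.slice (ppList (x :: y :: ys) _) none (some S) = _
        rw [PySem.List.slice_to _ hS]
        rw [take_ppList _ _ _ (extend_times_bound (x :: y :: ys).length h2 S hS)]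
        exact (alt_extend_big (x :: y :: ys) h2 S hS).symm
    · -- any other mode: both return img_list[:seq_len]
      simp only [extend_img_list, extend_img_list_alt, if_neg hrep, if_neg hext,
        if_neg (by simp [hext] : ¬(mode = "extend" ∧ 0 < l.length))]
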